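-- pv_equiv track=rewrite | github.com/xuzhiqin1990/anchor_function_pub | data.py | generate_mod_list_specific
-- ===== SOURCE A (Python) =====
-- def generate_mod_list_specific(data_min=20, data_max=100, mod=8):
--     '''将[data_min, data_max]中的数按照是否被mod整除分成两个字典，字典的key为mod的余数，value为对应的列表'''
--
--     train_lst, test_lst = {}, {}
--     for mod_num in range(mod):
--         mod_num_str = str(mod_num)
--         train_lst[mod_num_str] = []
--         test_lst[mod_num_str] = []
--         for i in range(data_min, data_max):
--             if i % mod == mod_num:
--                 test_lst[mod_num_str].append(i)
--             else:
--                 train_lst[mod_num_str].append(i)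
--
--     return train_lst, test_lst
-- ===== SOURCE B (Python) =====
-- def generate_mod_list_specific(data_min=20, data_max=100, mod=8):
--     '''For each remainder m, the test bucket is the arithmetic progression of
--     numbers congruent to m clipped to [data_min, data_max); the train bucket is
--     the full range with that progression removed by set difference.'''
--     nums = range(data_min, data_max)
--     train_lst, test_lst = {}, {}
--     for m in range(mod):
--         start = data_min + (m - data_min) % mod
--         hits = list(range(start, data_max, mod))
--         hit_set = set(hits)
--         test_lst[str(m)] = hits
--         train_lst[str(m)] = [i for i in nums if i not in hit_set]
--     return train_lst, test_lst
-- ===== Notes on version B (the rewrite author's own statement) =====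
-- stated objective: alternative
-- what changed: Each test bucket is produced directly as an arithmetic progression (range(start, data_max, mod)) instead of scanning the range testing i % mod, and each train bucket is the full range minus that progression via a set-membership filter.
import Mathlib
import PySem

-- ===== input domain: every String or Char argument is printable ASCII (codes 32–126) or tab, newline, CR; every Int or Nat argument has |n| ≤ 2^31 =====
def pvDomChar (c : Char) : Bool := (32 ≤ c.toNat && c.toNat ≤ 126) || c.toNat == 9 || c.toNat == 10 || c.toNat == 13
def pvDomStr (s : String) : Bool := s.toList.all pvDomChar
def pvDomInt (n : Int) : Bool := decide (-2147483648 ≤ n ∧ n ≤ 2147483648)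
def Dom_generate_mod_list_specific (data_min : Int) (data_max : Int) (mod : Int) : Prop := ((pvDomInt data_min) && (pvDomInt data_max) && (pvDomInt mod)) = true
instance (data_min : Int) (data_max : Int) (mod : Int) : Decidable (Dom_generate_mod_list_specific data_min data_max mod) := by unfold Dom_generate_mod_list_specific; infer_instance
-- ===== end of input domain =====

-- B builds each test bucket directly as an arithmetic progression and each train
-- bucket as the range minus that progression via set difference, instead of A's
-- per-remainder scan testing i % mod (objective: alternative algorithm).

-- ===== PORT A =====
def generate_mod_list_specific (data_min : Int) (data_max : Int) (mod : Int) :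
    (List (String × List Int)) × (List (String × List Int)) :=
  let res := (PySem.List.pyRange 0 mod).foldl
    (fun (st : PySem.Dict String (List Int) × PySem.Dict String (List Int)) mod_num =>
      let mod_num_str := PySem.Int.toStr mod_num
      let st1 := (st.1.insert mod_num_str [], st.2.insert mod_num_str [])
      (PySem.List.pyRange data_min data_max).foldl
        (fun st2 i =>
          if PySem.Int.mod i mod == mod_num then
            (st2.1, st2.2.modify mod_num_str [] (· ++ [i]))
          else
            (st2.1.modify mod_num_str [] (· ++ [i]), st2.2)) st1)
    (PySem.Dict.empty, PySem.Dict.empty)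
  (res.1.items, res.2.items)

-- ===== PORT B =====
def generate_mod_list_specific_alt (data_min : Int) (data_max : Int) (mod : Int) :
    (List (String × List Int)) × (List (String × List Int)) :=
  let nums := PySem.List.pyRange data_min data_max
  let res := (PySem.List.pyRange 0 mod).foldl
    (fun (st : PySem.Dict String (List Int) × PySem.Dict String (List Int)) m =>
      let start := data_min + PySem.Int.mod (m - data_min) mod
      let hits := PySem.List.pyRange start data_max mod
      let hitSet : PySem.Set Int := PySem.Set.ofList hits
      (st.1.insert (PySem.Int.toStr m) (nums.filter (fun i => !(hitSet.contains i))),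
       st.2.insert (PySem.Int.toStr m) hits))
    (PySem.Dict.empty, PySem.Dict.empty)
  (res.1.items, res.2.items)

-- ===== PRECONDITION & SPEC =====
def Spec_generate_mod_list_specific (data_min : Int) (data_max : Int) (mod : Int) (out : (List (String × List Int)) × (List (String × List Int))) : Prop := out = generate_mod_list_specific_alt data_min data_max mod
instance (data_min : Int) (data_max : Int) (mod : Int) (out : (List (String × List Int)) × (List (String × List Int))) : Decidable (Spec_generate_mod_list_specific data_min data_max mod out) := by unfold Spec_generate_mod_list_specific; infer_instance

-- ===== CLAIM (what is proved, stated in full; the proofs are below) =====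
def Claim_equal_generate_mod_list_specific : Prop := ∀ (data_min : Int) (data_max : Int) (mod : Int), Dom_generate_mod_list_specific data_min data_max mod → Spec_generate_mod_list_specific data_min data_max mod (generate_mod_list_specific data_min data_max mod)

-- ===== LEMMAS AND PROOFS =====

-- decimal decoding: a left inverse of Nat.toDigits 10, giving injectivity of str()
def pvDec (cs : List Char) : Nat := cs.foldl (fun a c => 10 * a + (c.toNat - 48)) 0

lemma pvDec_digitChar (d : Nat) (h : d < 10) : (Nat.digitChar d).toNat - 48 = d := by
  interval_cases d <;> decide

lemma toDigitsCore_append : ∀ (fuel n : Nat) (ds : List Char),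
    Nat.toDigitsCore 10 fuel n ds = Nat.toDigitsCore 10 fuel n [] ++ ds := by
  intro fuel
  induction fuel with
  | zero => intro n ds; simp [Nat.toDigitsCore]
  | succ f ih =>
    intro n ds
    simp only [Nat.toDigitsCore]
    by_cases h : n / 10 = 0
    · simp [h]
    · simp only [if_neg h]
      rw [ih (n / 10) ((n % 10).digitChar :: ds), ih (n / 10) [(n % 10).digitChar]]
      simp

lemma pvDec_toDigitsCore : ∀ (fuel n : Nat), n < 10 ^ fuel →
    pvDec (Nat.toDigitsCore 10 fuel n []) = n := by
  intro fuel
  induction fuel with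
  | zero => intro n h; simp at h; simp [Nat.toDigitsCore, pvDec, h]
  | succ f ih =>
    intro n h
    simp only [Nat.toDigitsCore]
    by_cases h0 : n / 10 = 0
    · have hn : n < 10 := by omega
      simp [h0, pvDec, pvDec_digitChar _ (Nat.mod_lt _ (by norm_num))]
      omega
    · simp only [if_neg h0]
      rw [toDigitsCore_append]
      have hdiv : n / 10 < 10 ^ f := by
        rw [Nat.div_lt_iff_lt_mul (by norm_num)]
        calc n < 10 ^ (f + 1) := h
        _ = 10 ^ f * 10 := by ring
      have := ih (n / 10) hdiv
      simp [pvDec, List.foldl_append] at this ⊢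
      rw [this, pvDec_digitChar _ (Nat.mod_lt _ (by norm_num))]
      omega

lemma pvDec_toDigits (n : Nat) : pvDec (Nat.toDigits 10 n) = n := by
  have hlt : n < 10 ^ (n + 1) :=
    lt_of_lt_of_le (Nat.lt_pow_self (by norm_num)) (Nat.pow_le_pow_right (by norm_num) (by omega))
  simpa [Nat.toDigits] using pvDec_toDigitsCore (n + 1) n hlt

lemma toStr_inj {m m' : Int} (hm : 0 ≤ m) (hm' : 0 ≤ m')
    (h : PySem.Int.toStr m = PySem.Int.toStr m') : m = m' := by
  have h2 : PySem.Int.toChars m = PySem.Int.toChars m' := by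
    rw [← PySem.Int.toList_toStr, ← PySem.Int.toList_toStr, h]
  simp only [PySem.Int.toChars, if_neg (by omega : ¬ m < 0), if_neg (by omega : ¬ m' < 0)] at h2
  have := congrArg pvDec h2
  rw [pvDec_toDigits, pvDec_toDigits] at this
  omega

-- dict whose items are a map over a list of (nonnegative, hence injectively named) ints
def mkmap (R : List Int) (g : Int → List Int) : PySem.Dict String (List Int) :=
  ⟨R.map (fun m => (PySem.Int.toStr m, g m))⟩

lemma mkmap_congr {R : List Int} {g g' : Int → List Int} (h : ∀ m ∈ R, g m = g' m) :
    mkmap R g = mkmap R g' := by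
  refine congrArg PySem.Dict.mk (List.map_congr_left fun m hm => ?_)
  rw [h m hm]

lemma get?_mkmap (g : Int → List Int) :
    ∀ (R : List Int) (m : Int), m ∈ R → (∀ x ∈ R, 0 ≤ x) →
      (mkmap R g).get? (PySem.Int.toStr m) = some (g m) := by
  intro R
  induction R with
  | nil => intro m hm _; cases hm
  | cons r R ih =>
    intro m hm h0
    by_cases hr : PySem.Int.toStr r = PySem.Int.toStr m
    · have hrm : r = m := toStr_inj (h0 r (by simp)) (by
        rcases List.mem_cons.mp hm with h | h
        · subst h; exact h0 m (by simp)
        · exact h0 m (List.mem_cons_of_mem _ h)) hr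
      subst hrm
      simp [mkmap, PySem.Dict.get?]
    · have hm' : m ∈ R := by
        rcases List.mem_cons.mp hm with h | h
        · exact absurd (by rw [h]) hr
        · exact h
      have := ih m hm' (fun x hx => h0 x (List.mem_cons_of_mem _ hx))
      simpa [mkmap, PySem.Dict.get?, hr] using this

lemma contains_mkmap {R : List Int} {m : Int} (hm : m ∈ R) (h0 : ∀ x ∈ R, 0 ≤ x)
    (g : Int → List Int) : (mkmap R g).contains (PySem.Int.toStr m) = true := by
  simp only [PySem.Dict.contains, List.any_eq_true]
  exact ⟨(PySem.Int.toStr m, g m), List.mem_map.mpr ⟨m, hm, rfl⟩, by simp⟩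

lemma contains_mkmap_false {R : List Int} {n : Int} (hn : 0 ≤ n) (hnotin : n ∉ R)
    (h0 : ∀ x ∈ R, 0 ≤ x) (g : Int → List Int) :
    (mkmap R g).contains (PySem.Int.toStr n) = false := by
  rw [PySem.Dict.contains, List.any_eq_false]
  rintro ⟨k, v⟩ hkv
  rcases List.mem_map.mp hkv with ⟨m, hmR, heq⟩
  intro hcontr
  have hk : PySem.Int.toStr m = k := congrArg Prod.fst heq
  have hk2 : k = PySem.Int.toStr n := eq_of_beq hcontr
  exact hnotin ((toStr_inj (h0 m hmR) hn (hk.trans hk2)) ▸ hmR)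

lemma insert_mkmap {R : List Int} {m : Int} (hm : m ∈ R) (h0 : ∀ x ∈ R, 0 ≤ x)
    (g : Int → List Int) (w : List Int) :
    (mkmap R g).insert (PySem.Int.toStr m) w = mkmap R (fun m' => if m' = m then w else g m') := by
  rw [PySem.Dict.insert, contains_mkmap hm h0 g, if_pos rfl]
  unfold mkmap
  congr 1
  rw [List.map_map]
  refine List.map_congr_left (fun m' hm' => ?_)
  by_cases he : m' = m
  · subst he; simp
  · have : (PySem.Int.toStr m' == PySem.Int.toStr m) = false := by
      simp only [beq_eq_false_iff_ne, ne_eq]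
      intro hc; exact he (toStr_inj (h0 m' hm') (h0 m hm) hc)
    simp only [Function.comp_apply]
    rw [if_neg (by simp [this]), if_neg he]

lemma modify_mkmap {R : List Int} {m : Int} (hm : m ∈ R) (h0 : ∀ x ∈ R, 0 ≤ x)
    (g : Int → List Int) (f : List Int → List Int) :
    (mkmap R g).modify (PySem.Int.toStr m) [] f
      = mkmap R (fun m' => if m' = m then f (g m') else g m') := by
  simp only [PySem.Dict.modify, PySem.Dict.getD, get?_mkmap g R m hm h0, Option.getD_some]
  rw [insert_mkmap hm h0]
  refine mkmap_congr (fun m' _ => ?_)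
  by_cases he : m' = m
  · subst he; simp
  · simp [he]

-- A's inner loop: appending the filtered numbers to the (single) current key
lemma A_inner (c : Int → Bool) {R : List Int} {n : Int} (hn : n ∈ R) (h0 : ∀ x ∈ R, 0 ≤ x) :
    ∀ (l : List Int) (g : Int → List Int),
      l.foldl (fun d i => if c i then d.modify (PySem.Int.toStr n) [] (· ++ [i]) else d) (mkmap R g)
        = mkmap R (fun m => if m = n then g m ++ l.filter c else g m) := by
  intro l
  induction l with
  | nil =>
    intro g
    refine (mkmap_congr (fun m _ => ?_)).symm
    by_cases he : m = n <;> simp [he]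
  | cons i l ih =>
    intro g
    by_cases h : c i
    · simp only [List.foldl_cons, if_pos h]
      rw [modify_mkmap hn h0, ih]
      refine mkmap_congr (fun m _ => ?_)
      by_cases he : m = n <;> simp [he, h]
    · simp only [List.foldl_cons, if_neg h]
      rw [ih]
      refine mkmap_congr (fun m _ => ?_)
      by_cases he : m = n <;> simp [he, h]

-- the two closed-form bucket contents
def trainF (data_min data_max mod m : Int) : List Int :=
  (PySem.List.pyRange data_min data_max).filter (fun i => !(PySem.Int.mod i mod == m))
def testF (data_min data_max mod m : Int) : List Int :=
  (PySem.List.pyRange data_min data_max).filter (fun i => PySem.Int.mod i mod == m)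

lemma split_stepA (m0 n : Int) (k : String) :
    ∀ (l : List Int) (a b : PySem.Dict String (List Int)),
      l.foldl (fun st2 i =>
          if PySem.Int.mod i m0 == n then (st2.1, st2.2.modify k [] (· ++ [i]))
          else (st2.1.modify k [] (· ++ [i]), st2.2)) (a, b)
        = (l.foldl (fun d i => if !(PySem.Int.mod i m0 == n) then d.modify k [] (· ++ [i]) else d) a,
           l.foldl (fun d i => if PySem.Int.mod i m0 == n then d.modify k [] (· ++ [i]) else d) b) := by
  intro l
  induction l with
  | nil => intro a b; rfl
  | cons i l ih =>
    intro a b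
    simp only [List.foldl_cons]
    by_cases h : PySem.Int.mod i m0 == n
    · rw [if_pos h, if_neg (by simp [h]), if_pos h]; exact ih _ _
    · rw [if_neg h, if_pos (by simp [h]), if_neg h]; exact ih _ _

lemma A_outer (dmin dmax m0 : Int) : ∀ (N : Nat),
    (PySem.List.pyRange 0 (N : Int)).foldl
      (fun (st : PySem.Dict String (List Int) × PySem.Dict String (List Int)) mod_num =>
        let mod_num_str := PySem.Int.toStr mod_num
        let st1 := (st.1.insert mod_num_str [], st.2.insert mod_num_str [])
        (PySem.List.pyRange dmin dmax).foldl
          (fun st2 i =>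
            if PySem.Int.mod i m0 == mod_num then
              (st2.1, st2.2.modify mod_num_str [] (· ++ [i]))
            else
              (st2.1.modify mod_num_str [] (· ++ [i]), st2.2)) st1)
      (PySem.Dict.empty, PySem.Dict.empty)
    = (mkmap (PySem.List.pyRange 0 (N : Int)) (trainF dmin dmax m0),
       mkmap (PySem.List.pyRange 0 (N : Int)) (testF dmin dmax m0)) := by
  intro N
  induction N with
  | zero =>
    rw [show ((0 : Nat) : Int) = 0 by rfl, PySem.List.pyRange_one_eq_nil le_rfl]
    rfl
  | succ N ih =>
    have hsucc : ((N + 1 : Nat) : Int) = (N : Int) + 1 := by push_cast; ring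
    rw [hsucc, PySem.List.pyRange_one_succ_right (by positivity), List.foldl_append, ih,
      List.foldl_cons, List.foldl_nil]
    set R : List Int := PySem.List.pyRange 0 (N : Int) with hRdef
    have h0R : ∀ x ∈ R, 0 ≤ x := fun x hx => (PySem.List.mem_pyRange_one.mp hx).1
    have hN0 : (0 : Int) ≤ (N : Int) := by positivity
    have hnotin : (N : Int) ∉ R := by
      intro hx; exact absurd (PySem.List.mem_pyRange_one.mp hx).2 (by omega)
    have h0R' : ∀ x ∈ R ++ [(N : Int)], 0 ≤ x := by
      intro x hx
      rcases List.mem_append.mp hx with h | h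
      · exact h0R x h
      · simp at h; omega
    have hNmem : (N : Int) ∈ R ++ [(N : Int)] := List.mem_append_right _ (by simp)
    have hins : ∀ g : Int → List Int,
        (mkmap R g).insert (PySem.Int.toStr (N : Int)) []
          = mkmap (R ++ [(N : Int)]) (fun m => if m = (N : Int) then [] else g m) := by
      intro g
      rw [PySem.Dict.insert, contains_mkmap_false hN0 hnotin h0R g]
      simp only [Bool.false_eq_true, if_false]
      unfold mkmap
      congr 1
      rw [List.map_append]
      congr 1
      · refine List.map_congr_left (fun m hmR => ?_)
        have : m ≠ (N : Int) := fun he => hnotin (he ▸ hmR)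
        simp [this]
      · simp
    dsimp only
    rw [hins, hins, split_stepA,
      A_inner (fun i => !(PySem.Int.mod i m0 == (N : Int))) hNmem h0R',
      A_inner (fun i => PySem.Int.mod i m0 == (N : Int)) hNmem h0R']
    refine Prod.ext ?_ ?_ <;> refine mkmap_congr (fun m hm => ?_) <;> by_cases he : m = (N : Int)
    · subst he; simp [trainF]
    · simp [he]
    · subst he; simp [testF]
    · simp [he]

-- ===== B-side lemmas =====

-- B's bucket contents as functions of the remainder
def gB (dmin dmax m0 m : Int) : List Int :=
  PySem.List.pyRange (dmin + PySem.Int.mod (m - dmin) m0) dmax m0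
def fB (dmin dmax m0 m : Int) : List Int :=
  (PySem.List.pyRange dmin dmax).filter
    (fun i => !((PySem.Set.ofList (gB dmin dmax m0 m)).contains i))

lemma foldl_pair_insert (F G : Int → List Int) :
    ∀ (R : List Int) (a b : PySem.Dict String (List Int)),
      R.foldl (fun st m => (st.1.insert (PySem.Int.toStr m) (F m),
                            st.2.insert (PySem.Int.toStr m) (G m))) (a, b)
        = (R.foldl (fun d m => d.insert (PySem.Int.toStr m) (F m)) a,
           R.foldl (fun d m => d.insert (PySem.Int.toStr m) (G m)) b) := by
  intro R
  induction R with
  | nil => intro a b; rfl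
  | cons m R ih => intro a b; simp only [List.foldl_cons]; exact ih _ _

lemma B_closed (dmin dmax m0 : Int) :
    generate_mod_list_specific_alt dmin dmax m0
      = ((PySem.List.pyRange 0 m0).map (fun m => (PySem.Int.toStr m, fB dmin dmax m0 m)),
         (PySem.List.pyRange 0 m0).map (fun m => (PySem.Int.toStr m, gB dmin dmax m0 m))) := by
  unfold generate_mod_list_specific_alt fB gB
  dsimp only
  rw [foldl_pair_insert
    (fun m => List.filter
      (fun i => !(PySem.Set.ofList (PySem.List.pyRange (dmin + PySem.Int.mod (m - dmin) m0) dmax m0)).contains i)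
      (PySem.List.pyRange dmin dmax))
    (fun m => PySem.List.pyRange (dmin + PySem.Int.mod (m - dmin) m0) dmax m0)]
  have h0 : ∀ x ∈ PySem.List.pyRange 0 m0, 0 ≤ x :=
    fun x hx => (PySem.List.mem_pyRange_one.mp hx).1
  have hnd : ((PySem.List.pyRange 0 m0).map (fun m => PySem.Int.toStr m)).Nodup :=
    List.Nodup.map_on (fun x hx y hy h => toStr_inj (h0 x hx) (h0 y hy) h)
      (PySem.List.nodup_pyRange_one _ _)
  rw [PySem.Dict.items_foldl_insert_fresh _ _ _ _ (fun a _ => PySem.Dict.contains_empty _) hnd,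
      PySem.Dict.items_foldl_insert_fresh _ _ _ _ (fun a _ => PySem.Dict.contains_empty _) hnd]
  rfl

lemma pairwise_lt_pyRange_pos (a b : Int) {s : Int} (hs : 0 < s) :
    (PySem.List.pyRange a b s).Pairwise (· < ·) := by
  rw [PySem.List.pyRange_of_pos a b hs]
  refine List.pairwise_map.mpr (List.pairwise_lt_range.imp ?_)
  intro k k' hkk'
  have hk : (k : Int) < (k' : Int) := by exact_mod_cast hkk'
  have := mul_lt_mul_of_pos_left hk hs
  linarith

lemma mem_gB_iff {s : Int} (hs : 0 < s) {m : Int} (hm0 : 0 ≤ m) (hms : m < s)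
    (dmin dmax i : Int) :
    i ∈ gB dmin dmax s m ↔ (dmin ≤ i ∧ i < dmax ∧ PySem.Int.mod i s = m) := by
  unfold gB
  rw [PySem.List.mem_pyRange_iff_of_pos hs, PySem.Int.mod_eq_emod_of_pos hs,
    PySem.Int.mod_eq_emod_of_pos hs]
  have he0 : 0 ≤ (m - dmin) % s := Int.emod_nonneg _ (ne_of_gt hs)
  have hes : (m - dmin) % s < s := Int.emod_lt_of_pos _ hs
  obtain ⟨k2, hk2⟩ : s ∣ (m - dmin) - (m - dmin) % s := Int.dvd_self_sub_emod
  constructor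
  · rintro ⟨hle, hlt, ⟨k1, hk1⟩⟩
    have hdm : i - m = s * (k1 - k2) := by rw [mul_sub]; omega
    have hmod : i % s = m := by
      have : i = m + s * (k1 - k2) := by omega
      rw [this, Int.add_mul_emod_self_left, Int.emod_eq_of_lt hm0 hms]
    exact ⟨by omega, hlt, hmod⟩
  · rintro ⟨hge, hlt, hmod⟩
    obtain ⟨k3, hk3⟩ : s ∣ i - m := hmod ▸ Int.dvd_self_sub_emod
    have hdvd2 : s ∣ i - (dmin + (m - dmin) % s) := ⟨k3 + k2, by rw [mul_add]; omega⟩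
    refine ⟨?_, hlt, hdvd2⟩
    by_contra h
    push Not at h
    obtain ⟨k, hk⟩ := hdvd2
    have hkneg : k < 0 := by
      by_contra hk0
      push Not at hk0
      have := mul_nonneg hs.le hk0
      omega
    have hk1 : k ≤ -1 := by omega
    have : s * k ≤ s * (-1) := mul_le_mul_of_nonneg_left hk1 hs.le
    omega

lemma gB_eq_testF {s : Int} (hs : 0 < s) {m : Int} (hm0 : 0 ≤ m) (hms : m < s)
    (dmin dmax : Int) : gB dmin dmax s m = testF dmin dmax s m := by
  have hp1 : (gB dmin dmax s m).Pairwise (· < ·) := pairwise_lt_pyRange_pos _ _ hs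
  have hp2 : (testF dmin dmax s m).Pairwise (· < ·) :=
    (PySem.List.pairwise_lt_pyRange_one _ _).filter _
  have hmem : ∀ x, x ∈ testF dmin dmax s m ↔ x ∈ gB dmin dmax s m := by
    intro x
    rw [testF, List.mem_filter, PySem.List.mem_pyRange_one, mem_gB_iff hs hm0 hms,
      beq_iff_eq]
    tauto
  have hperm : (testF dmin dmax s m).Perm (gB dmin dmax s m) :=
    (List.perm_ext_iff_of_nodup (hp2.imp (fun h => ne_of_lt h))
      (hp1.imp (fun h => ne_of_lt h))).mpr hmem
  have h1 := PySem.List.sorted_eq_of_perm_of_pairwise_lt (testF dmin dmax s m)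
    (gB dmin dmax s m) (fun x => x) hperm.symm hp1
  have h2 := PySem.List.sorted_eq_of_perm_of_pairwise_lt (testF dmin dmax s m)
    (testF dmin dmax s m) (fun x => x) (List.Perm.refl _) hp2
  rw [← h1, h2]

lemma fB_eq_trainF {s : Int} (hs : 0 < s) {m : Int} (hm0 : 0 ≤ m) (hms : m < s)
    (dmin dmax : Int) : fB dmin dmax s m = trainF dmin dmax s m := by
  unfold fB trainF
  refine List.filter_congr (fun i hi => ?_)
  congr 1
  by_cases hc : (PySem.Int.mod i s == m) = true
  · have hmem : i ∈ gB dmin dmax s m := by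
      rw [gB_eq_testF hs hm0 hms, testF, List.mem_filter]
      exact ⟨hi, hc⟩
    rw [hc, (PySem.Set.contains_iff _ _).mpr ((PySem.Set.mem_ofList _ _).mpr hmem)]
  · have hnmem : i ∉ gB dmin dmax s m := by
      rw [gB_eq_testF hs hm0 hms, testF, List.mem_filter]
      rintro ⟨-, hc'⟩; exact hc hc'
    have : ((PySem.Set.ofList (gB dmin dmax s m)).contains i) = false := by
      rw [← Bool.not_eq_true, PySem.Set.contains_iff, PySem.Set.mem_ofList]
      exact hnmem
    rw [this, Bool.eq_false_iff.mpr hc]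

theorem generate_mod_list_specific_spec : Claim_equal_generate_mod_list_specific := by
  intro dmin dmax m0 _
  unfold Spec_generate_mod_list_specific
  rw [B_closed]
  unfold generate_mod_list_specific
  by_cases hm : m0 ≤ 0
  · rw [PySem.List.pyRange_one_eq_nil hm]
    rfl
  · have hcast : ((m0.toNat : Nat) : Int) = m0 := Int.toNat_of_nonneg (by omega)
    rw [show PySem.List.pyRange 0 m0 = PySem.List.pyRange 0 ((m0.toNat : Nat) : Int) by
      rw [hcast]]
    rw [A_outer dmin dmax m0 m0.toNat]
    refine Prod.ext ?_ ?_ <;>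
      · show List.map _ _ = List.map _ _
        refine List.map_congr_left (fun m hmR => ?_)
        have hb := PySem.List.mem_pyRange_one.mp hmR
        have hm0' : 0 ≤ m := hb.1
        have hms : m < m0 := by have := hb.2; omega
        first
        | rw [fB_eq_trainF (by omega : (0:Int) < m0) hm0' hms]
        | rw [gB_eq_testF (by omega : (0:Int) < m0) hm0' hms]
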